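-- pv_equiv track=rewrite | github.com/vedantMahangade/domain_adaptive_llm | get_domain_specific_tokens.py | select_augmentations
-- ===== SOURCE A (Python) =====
-- def select_augmentations(score_dkl, T_domain_raw, T_base_raw, max_len=10, fmin=20, top_n=10000):
--     augmentations = []
--     sorted_seqs = sorted(score_dkl.items(), key=lambda x: -x[1])
--     for seq, score in sorted_seqs:
--         if len(augmentations) >= top_n:
--             break
--         if len(seq) <= max_len and T_domain_raw.get(seq, 0) >= fmin and T_base_raw.get(seq, 0) >= fmin:
--             augmentations.append(seq)
--
--     return augmentations
-- ===== SOURCE B (Python) =====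
-- def select_augmentations(score_dkl, T_domain_raw, T_base_raw, max_len=10, fmin=20, top_n=10000):
--     # bucket the qualifying sequences by score, then walk the distinct scores
--     # in descending order, emitting each bucket (insertion order) until top_n
--     buckets = {}
--     for seq, score in score_dkl.items():
--         if len(seq) <= max_len and T_domain_raw.get(seq, 0) >= fmin and T_base_raw.get(seq, 0) >= fmin:
--             buckets.setdefault(score, []).append(seq)
--     result = []
--     for score in sorted(buckets, reverse=True):
--         for seq in buckets[score]:
--             if len(result) >= top_n:
--                 return result
--             result.append(seq)
--     return result
-- ===== Notes on version B (the rewrite author's own statement) =====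
-- stated objective: alternative
-- what changed: A comparison-sorts the entire score dict by -score and scans the result with the length/frequency filters and an early-break counter; B never sorts the pairs at all: it groups qualifying sequences into a dict of score->bucket (one filtering pass), sorts only the distinct score keys descending, and emits the buckets in that order until top_n, relying on bucket insertion order for tie-breaking.
import Mathlib
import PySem

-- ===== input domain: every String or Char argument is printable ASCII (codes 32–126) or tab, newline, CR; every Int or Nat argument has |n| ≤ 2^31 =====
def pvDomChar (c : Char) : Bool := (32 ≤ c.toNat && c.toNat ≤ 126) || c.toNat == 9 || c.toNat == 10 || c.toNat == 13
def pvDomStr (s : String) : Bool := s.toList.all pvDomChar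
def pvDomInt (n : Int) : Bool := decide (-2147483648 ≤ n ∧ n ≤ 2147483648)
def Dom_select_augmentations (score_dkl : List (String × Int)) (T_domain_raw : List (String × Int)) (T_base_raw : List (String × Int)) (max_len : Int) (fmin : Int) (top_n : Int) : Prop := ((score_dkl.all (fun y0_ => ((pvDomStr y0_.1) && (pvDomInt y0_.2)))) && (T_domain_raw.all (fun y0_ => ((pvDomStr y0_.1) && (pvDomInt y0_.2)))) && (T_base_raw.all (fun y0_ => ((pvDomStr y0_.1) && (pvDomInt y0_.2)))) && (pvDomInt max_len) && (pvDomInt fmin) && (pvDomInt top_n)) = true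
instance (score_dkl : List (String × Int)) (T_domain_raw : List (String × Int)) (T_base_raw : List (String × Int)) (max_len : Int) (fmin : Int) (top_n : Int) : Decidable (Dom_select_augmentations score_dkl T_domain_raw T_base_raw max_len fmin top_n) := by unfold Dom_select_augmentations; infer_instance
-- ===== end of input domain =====

-- B replaces A's sort-everything-then-scan-with-early-break by a bucket scheme: one filtering
-- pass groups qualifying sequences into score buckets, only the distinct scores are sorted
-- (descending), and the buckets are emitted in that order until top_n; same result, alternative algorithm.

-- ===== PORT A =====
def selAugLoop (T_dom T_base : PySem.Dict String Int) (max_len fmin top_n : Int) : List (String × Int) → List String → List String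
  | [], augmentations => augmentations
  | (seq, _score) :: rest, augmentations =>
    if (augmentations.length : Int) ≥ top_n then augmentations
    else if PySem.Str.len seq ≤ max_len ∧ T_dom.getD seq 0 ≥ fmin ∧ T_base.getD seq 0 ≥ fmin then
      selAugLoop T_dom T_base max_len fmin top_n rest (augmentations ++ [seq])
    else
      selAugLoop T_dom T_base max_len fmin top_n rest augmentations

def select_augmentations (score_dkl : List (String × Int)) (T_domain_raw : List (String × Int)) (T_base_raw : List (String × Int)) (max_len : Int) (fmin : Int) (top_n : Int) : List String :=
  let sorted_seqs := PySem.List.sorted (PySem.Dict.ofList score_dkl).items (fun x => -x.2) false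
  selAugLoop (PySem.Dict.ofList T_domain_raw) (PySem.Dict.ofList T_base_raw) max_len fmin top_n sorted_seqs []

-- ===== PORT B =====
-- inner 'for seq in buckets[score]' with the early 'return result'; the Bool flags the early return
def selBucketInner (top_n : Int) : List String → List String → (List String × Bool)
  | [], result => (result, false)
  | seq :: rest, result =>
    if (result.length : Int) ≥ top_n then (result, true)
    else selBucketInner top_n rest (result ++ [seq])

-- outer 'for score in sorted(buckets, reverse=True)'
def selBucketOuter (buckets : PySem.Dict Int (List String)) (top_n : Int) : List Int → List String → List String
  | [], result => result
  | score :: rest, result =>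
    match selBucketInner top_n (buckets.getD score []) result with
    | (result', true) => result'
    | (result', false) => selBucketOuter buckets top_n rest result'

def select_augmentations_alt (score_dkl : List (String × Int)) (T_domain_raw : List (String × Int)) (T_base_raw : List (String × Int)) (max_len : Int) (fmin : Int) (top_n : Int) : List String :=
  let T_dom := PySem.Dict.ofList T_domain_raw
  let T_base := PySem.Dict.ofList T_base_raw
  let buckets := (PySem.Dict.ofList score_dkl).items.foldl
    (fun d x =>
      if PySem.Str.len x.1 ≤ max_len ∧ T_dom.getD x.1 0 ≥ fmin ∧ T_base.getD x.1 0 ≥ fmin then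
        d.modify x.2 [] (fun l => l ++ [x.1])
      else d)
    PySem.Dict.empty
  selBucketOuter buckets top_n (PySem.List.sorted buckets.keys (fun k => k) true) []

-- ===== PRECONDITION & SPEC =====
def Spec_select_augmentations (score_dkl : List (String × Int)) (T_domain_raw : List (String × Int)) (T_base_raw : List (String × Int)) (max_len : Int) (fmin : Int) (top_n : Int) (out : List String) : Prop := out = select_augmentations_alt score_dkl T_domain_raw T_base_raw max_len fmin top_n
instance (score_dkl : List (String × Int)) (T_domain_raw : List (String × Int)) (T_base_raw : List (String × Int)) (max_len : Int) (fmin : Int) (top_n : Int) (out : List String) : Decidable (Spec_select_augmentations score_dkl T_domain_raw T_base_raw max_len fmin top_n out) := by unfold Spec_select_augmentations; infer_instance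

-- ===== CLAIM (what is proved, stated in full; the proofs are below) =====
def Claim_equal_select_augmentations : Prop := ∀ (score_dkl : List (String × Int)) (T_domain_raw : List (String × Int)) (T_base_raw : List (String × Int)) (max_len : Int) (fmin : Int) (top_n : Int), Dom_select_augmentations score_dkl T_domain_raw T_base_raw max_len fmin top_n → Spec_select_augmentations score_dkl T_domain_raw T_base_raw max_len fmin top_n (select_augmentations score_dkl T_domain_raw T_base_raw max_len fmin top_n)

-- ===== LEMMAS AND PROOFS =====

-- insertBy with an ascending-key comparison keeps the list Pairwise-ordered
theorem pairwise_ins {α : Type} (key : α → Int) (x : α) (ys : List α)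
    (h : ys.Pairwise (fun a b => key a ≤ key b)) :
    (PySem.List.insertBy (fun a b => decide (key a < key b)) x ys).Pairwise (fun a b => key a ≤ key b) := by
  induction ys with
  | nil => simp [PySem.List.insertBy]
  | cons y ys ih =>
    rw [List.pairwise_cons] at h
    obtain ⟨hy, hys⟩ := h
    simp only [PySem.List.insertBy]
    split_ifs with hlt
    · refine List.Pairwise.cons ?_ (List.pairwise_cons.mpr ⟨hy, hys⟩)
      intro z hz
      rw [List.mem_cons] at hz
      rcases hz with rfl | hz
      · exact le_of_lt (of_decide_eq_true hlt)
      · exact le_trans (le_of_lt (of_decide_eq_true hlt)) (hy z hz)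
    · refine List.Pairwise.cons ?_ (ih hys)
      intro z hz
      rw [PySem.List.mem_insertBy] at hz
      rcases hz with rfl | hz
      · exact le_of_not_gt (fun hgt => hlt (decide_eq_true hgt))
      · exact hy z hz

theorem filter_ins_pos {α : Type} (key : α → Int) (p : α → Bool) (x : α) (ys : List α)
    (h : ys.Pairwise (fun a b => key a ≤ key b)) (hx : p x = true) :
    (PySem.List.insertBy (fun a b => decide (key a < key b)) x ys).filter p
      = PySem.List.insertBy (fun a b => decide (key a < key b)) x (ys.filter p) := by
  induction ys with
  | nil => simp [PySem.List.insertBy, hx]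
  | cons y ys ih =>
    rw [List.pairwise_cons] at h
    obtain ⟨hy, hys⟩ := h
    have hxy := of_decide_eq_true (p := key x < key y)
    simp only [PySem.List.insertBy]
    split_ifs with hlt
    · cases hpy : p y with
      | true => simp [hx, hpy, PySem.List.insertBy, hlt]
      | false =>
        simp only [List.filter_cons, hx, hpy, if_true, Bool.false_eq_true, if_false]
        cases hfil : ys.filter p with
        | nil => simp [PySem.List.insertBy]
        | cons z zs =>
          have hz : z ∈ ys.filter p := by rw [hfil]; exact List.mem_cons_self
          have hz2 : z ∈ ys := List.mem_of_mem_filter hz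
          have hxz : key x < key z := lt_of_lt_of_le (hxy hlt) (hy z hz2)
          simp [PySem.List.insertBy, decide_eq_true hxz]
    · cases hpy : p y with
      | true =>
        simp only [List.filter_cons, hpy, if_true]
        simp [PySem.List.insertBy, hlt, ih hys]
      | false =>
        simp only [List.filter_cons, hpy, Bool.false_eq_true, if_false]
        exact ih hys

theorem filter_ins_neg {α : Type} (before : α → α → Bool) (p : α → Bool) (x : α) (ys : List α)
    (hx : p x = false) :
    (PySem.List.insertBy before x ys).filter p = ys.filter p := by
  induction ys with
  | nil => simp [PySem.List.insertBy, hx]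
  | cons y ys ih =>
    simp only [PySem.List.insertBy]
    split_ifs with hlt
    · simp [List.filter_cons, hx]
    · rw [List.filter_cons, List.filter_cons, ih]

theorem filter_foldl_ins {α : Type} (key : α → Int) (p : α → Bool) (xs : List α) :
    ∀ acc : List α, acc.Pairwise (fun a b => key a ≤ key b) →
    (xs.foldl (fun acc x => PySem.List.insertBy (fun a b => decide (key a < key b)) x acc) acc).filter p
      = (xs.filter p).foldl (fun acc x => PySem.List.insertBy (fun a b => decide (key a < key b)) x acc) (acc.filter p) := by
  induction xs with
  | nil => intro acc _; simp
  | cons x xs ih =>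
    intro acc hacc
    cases hx : p x with
    | true =>
      rw [List.foldl_cons, List.filter_cons, if_pos hx, List.foldl_cons,
          ih _ (pairwise_ins key x acc hacc), filter_ins_pos key p x acc hacc hx]
    | false =>
      rw [List.foldl_cons, List.filter_cons, if_neg (by simp [hx]),
          ih _ (pairwise_ins key x acc hacc), filter_ins_neg _ p x acc hx]

-- filter commutes with Python's stable sort
theorem filter_sorted {α : Type} (key : α → Int) (p : α → Bool) (xs : List α) :
    (PySem.List.sorted xs key false).filter p = PySem.List.sorted (xs.filter p) key false := by
  simpa [PySem.List.sorted] using filter_foldl_ins key p xs [] (by simp)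

-- A's capped scan over a list equals map-fst of the first (top_n - |acc|) filtered elements
theorem selAugLoop_eq (T_dom T_base : PySem.Dict String Int) (max_len fmin top_n : Int) :
    ∀ (S : List (String × Int)) (acc : List String),
    selAugLoop T_dom T_base max_len fmin top_n S acc
      = acc ++ ((S.filter (fun x => decide (PySem.Str.len x.1 ≤ max_len) && decide (T_dom.getD x.1 0 ≥ fmin) && decide (T_base.getD x.1 0 ≥ fmin))).map (fun x => x.1)).take (top_n - acc.length).toNat := by
  intro S
  induction S with
  | nil => intro acc; simp [selAugLoop]
  | cons hd rest ih =>
    intro acc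
    obtain ⟨seq, score⟩ := hd
    simp only [selAugLoop]
    split_ifs with hfull hcond
    · have : (top_n - acc.length).toNat = 0 := by omega
      simp [List.filter_cons, this]
    · have hc : (decide (PySem.Str.len seq ≤ max_len) && decide (T_dom.getD seq 0 ≥ fmin) && decide (T_base.getD seq 0 ≥ fmin)) = true := by
        simp only [Bool.and_eq_true, decide_eq_true_eq]
        exact ⟨⟨hcond.1, hcond.2.1⟩, hcond.2.2⟩
      rw [ih, List.filter_cons, if_pos hc]
      simp only [List.map_cons]
      have hlen : (top_n - acc.length).toNat = (top_n - (acc ++ [seq]).length).toNat + 1 := by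
        simp only [List.length_append, List.length_cons, List.length_nil]
        omega
      rw [hlen, List.take_succ_cons, List.append_assoc]
      rfl
    · have hc : (decide (PySem.Str.len seq ≤ max_len) && decide (T_dom.getD seq 0 ≥ fmin) && decide (T_base.getD seq 0 ≥ fmin)) = false := by
        rw [Bool.eq_false_iff]
        intro h
        simp only [Bool.and_eq_true, decide_eq_true_eq] at h
        exact hcond ⟨h.1.1, h.1.2, h.2⟩
      rw [ih, List.filter_cons, hc]
      simp

-- ---------- bucket-sort correctness ----------

-- insert a key into a strictly descending list of keys (no duplicate if present)
def insDesc (k : Int) : List Int → List Int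
  | [] => [k]
  | j :: t => if j < k then k :: j :: t else if j = k then j :: t else j :: insDesc k t

theorem mem_insDesc (k m : Int) (t : List Int) : m ∈ insDesc k t ↔ m = k ∨ m ∈ t := by
  induction t with
  | nil => simp [insDesc]
  | cons j t ih =>
    simp only [insDesc]
    split_ifs with h1 h2
    · simp only [List.mem_cons]
    · subst h2; simp only [List.mem_cons]; tauto
    · simp only [List.mem_cons, ih]; tauto

theorem pairwise_insDesc (k : Int) (t : List Int) (h : t.Pairwise (fun a b => b < a)) :
    (insDesc k t).Pairwise (fun a b => b < a) := by
  induction t with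
  | nil => simp [insDesc]
  | cons j t ih =>
    rw [List.pairwise_cons] at h
    obtain ⟨hj, ht⟩ := h
    simp only [insDesc]
    split_ifs with h1 h2
    · refine List.Pairwise.cons ?_ (List.pairwise_cons.mpr ⟨hj, ht⟩)
      intro z hz
      rcases List.mem_cons.mp hz with rfl | hz
      exacts [h1, lt_trans (hj z hz) h1]
    · exact List.pairwise_cons.mpr ⟨hj, ht⟩
    · refine List.Pairwise.cons ?_ (ih ht)
      intro z hz
      rcases (mem_insDesc k z t).mp hz with rfl | hz
      · omega
      · exact hj z hz

theorem insDesc_of_mem (k : Int) (t : List Int) (h : t.Pairwise (fun a b => b < a)) (hk : k ∈ t) :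
    insDesc k t = t := by
  induction t with
  | nil => cases hk
  | cons j t ih =>
    rw [List.pairwise_cons] at h
    obtain ⟨hj, ht⟩ := h
    simp only [insDesc]
    rcases List.mem_cons.mp hk with rfl | hk
    · simp
    · have : k < j := hj k hk
      rw [if_neg (by omega), if_neg (by omega), ih ht hk]

theorem insDesc_perm (k : Int) (t : List Int) (hk : k ∉ t) :
    (insDesc k t).Perm (k :: t) := by
  induction t with
  | nil => simp [insDesc]
  | cons j t ih =>
    simp only [insDesc]
    have hkj : k ≠ j := fun h => hk (h ▸ List.mem_cons_self)
    split_ifs with h1 h2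
    · exact List.Perm.refl _
    · omega
    · exact ((ih (fun h => hk (List.mem_cons_of_mem _ h))).cons j).trans (List.Perm.swap k j t)

-- insertBy skips a prefix none of whose elements trigger 'before'
theorem insertBy_append_skip {α : Type} (before : α → α → Bool) (x : α) (A B : List α)
    (hA : ∀ y ∈ A, before x y = false) :
    PySem.List.insertBy before x (A ++ B) = A ++ PySem.List.insertBy before x B := by
  induction A with
  | nil => simp
  | cons a A ih =>
    simp only [List.cons_append, PySem.List.insertBy, hA a List.mem_cons_self,
      Bool.false_eq_true, if_false]
    rw [ih (fun y hy => hA y (List.mem_cons_of_mem _ hy))]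

theorem insertBy_all_before {α : Type} (before : α → α → Bool) (x : α) (L : List α)
    (hL : ∀ y ∈ L, before x y = true) :
    PySem.List.insertBy before x L = x :: L := by
  cases L with
  | nil => rfl
  | cons y t => simp [PySem.List.insertBy, hL y List.mem_cons_self]

-- inserting a pair into a descending-bucket concatenation = appending it to its bucket
theorem insertBy_flatMap (x : String × Int) (ks : List Int) (f : Int → List (String × Int))
    (hdec : ks.Pairwise (fun a b => b < a))
    (hf : ∀ k ∈ ks, ∀ y ∈ f k, y.2 = k)
    (hmiss : x.2 ∉ ks → f x.2 = []) :
    PySem.List.insertBy (fun a b => decide (-a.2 < -b.2)) x (ks.flatMap f)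
      = (insDesc x.2 ks).flatMap (fun k => if k = x.2 then f k ++ [x] else f k) := by
  induction ks with
  | nil =>
    have h0 : f x.2 = [] := hmiss (by simp)
    simp [insDesc, PySem.List.insertBy, h0]
  | cons k t ih =>
    rw [List.pairwise_cons] at hdec
    obtain ⟨hk, ht⟩ := hdec
    rcases lt_trichotomy k x.2 with hlt | heq | hgt
    · -- x's score beats every bucket: x goes in front as a fresh bucket
      have hnm : x.2 ∉ k :: t := by
        intro hmem
        rcases List.mem_cons.mp hmem with he | hmem
        · omega
        · have := hk _ hmem; omega
      have h0 : f x.2 = [] := hmiss hnm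
      have hall : ∀ y ∈ (k :: t).flatMap f, (fun a b => decide (-a.2 < -b.2)) x y = true := by
        intro y hy
        rw [List.mem_flatMap] at hy
        obtain ⟨j, hj, hyj⟩ := hy
        have h1 := hf j hj y hyj
        have h2 : j = k ∨ j < k := by
          rcases List.mem_cons.mp hj with rfl | hj
          · exact Or.inl rfl
          · exact Or.inr (hk j hj)
        simp only [decide_eq_true_eq]; omega
      have hins : insDesc x.2 (k :: t) = x.2 :: k :: t := by
        simp only [insDesc, if_pos hlt]
      have hcong : List.flatMap (fun j => if j = x.2 then f j ++ [x] else f j) (k :: t)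
          = List.flatMap f (k :: t) :=
        List.flatMap_congr (fun j hj => if_neg (fun h : j = x.2 => hnm (by rwa [h] at hj)))
      have hrhs : List.flatMap (fun j => if j = x.2 then f j ++ [x] else f j) (x.2 :: k :: t)
          = [x] ++ List.flatMap f (k :: t) := by
        rw [List.flatMap_cons, if_pos rfl, h0, hcong]
        rfl
      rw [insertBy_all_before _ x _ hall, hins, hrhs]
      rfl
    · -- x's score is the head bucket's: x is appended to that bucket
      subst heq
      have hnt : x.2 ∉ t := fun h => absurd (hk _ h) (lt_irrefl _)
      have hins : insDesc x.2 (x.2 :: t) = x.2 :: t := by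
        simp [insDesc]
      rw [List.flatMap_cons,
        insertBy_append_skip _ x _ _ (by
          intro y hy
          have := hf x.2 List.mem_cons_self y hy
          simp only [decide_eq_false_iff_not]; omega),
        insertBy_all_before _ x _ (by
          intro y hy
          rw [List.mem_flatMap] at hy
          obtain ⟨j, hj, hyj⟩ := hy
          have h1 := hf j (List.mem_cons_of_mem _ hj) y hyj
          have h2 := hk j hj
          simp only [decide_eq_true_eq]; omega),
        hins]
      have hcong : List.flatMap (fun j => if j = x.2 then f j ++ [x] else f j) t
          = List.flatMap f t :=
        List.flatMap_congr (fun j hj => if_neg (fun h : j = x.2 => hnt (by rwa [h] at hj)))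
      rw [List.flatMap_cons, if_pos rfl, hcong]
      simp
    · -- head bucket stays in place, insert into the tail
      have hins : insDesc x.2 (k :: t) = k :: insDesc x.2 t := by
        simp only [insDesc, if_neg (by omega : ¬ k < x.2), if_neg (by omega : ¬ k = x.2)]
      rw [List.flatMap_cons,
        insertBy_append_skip _ x _ _ (by
          intro y hy
          have := hf k List.mem_cons_self y hy
          simp only [decide_eq_false_iff_not]; omega),
        ih ht (fun j hj => hf j (List.mem_cons_of_mem _ hj))
          (fun hn => hmiss (by
            simp only [List.mem_cons, not_or]
            exact ⟨by omega, hn⟩)),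
        hins, List.flatMap_cons, if_neg (by omega : ¬ k = x.2)]

-- a list is Pairwise-strict when it is Pairwise-nonstrict and Nodup
theorem pairwise_lt_of_nodup_ge (t : List Int) (h1 : t.Pairwise (fun a b => b ≤ a))
    (h2 : t.Nodup) : t.Pairwise (fun a b => b < a) := by
  have := List.Pairwise.and h1 h2
  exact this.imp (fun {a b} h => lt_of_le_of_ne h.1 (fun he => h.2 he.symm))

-- the stable sort by descending score IS the descending-key bucket concatenation
theorem sorted_eq_buckets (P : List (String × Int)) :
    PySem.List.sorted P (fun x => -x.2) false
      = (PySem.List.sorted (PySem.Set.ofList (P.map (fun x => x.2))) (fun k => k) true).flatMap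
          (fun k => P.filter (fun x => x.2 == k)) := by
  induction P using List.reverseRecOn with
  | nil => simp [PySem.List.sorted]
  | append_singleton P x ih =>
    have hsort : PySem.List.sorted (P ++ [x]) (fun y : String × Int => -y.2) false
        = PySem.List.insertBy (fun a b => decide (-a.2 < -b.2)) x
            (PySem.List.sorted P (fun y => -y.2) false) := by
      rw [PySem.List.sorted_eq_foldl_insertBy, PySem.List.sorted_eq_foldl_insertBy,
        List.foldl_append, List.foldl_cons, List.foldl_nil]
    set ks := PySem.List.sorted (PySem.Set.ofList (P.map (fun x => x.2))) (fun k => k) true with hks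
    have hksmem : ∀ m, m ∈ ks ↔ m ∈ P.map (fun x => x.2) := by
      intro m
      rw [hks, PySem.List.mem_sorted, PySem.Set.mem_ofList]
    have hksdec : ks.Pairwise (fun a b => b < a) := by
      refine pairwise_lt_of_nodup_ge ks (PySem.List.sorted_pairwise_rev _ _) ?_
      exact (PySem.Set.nodup_ofList _).perm (PySem.List.sorted_perm _ _ _).symm
    have hfilt : ∀ k ∈ ks, ∀ y ∈ P.filter (fun x => x.2 == k), y.2 = k := by
      intro k _ y hy
      exact eq_of_beq (List.mem_filter.mp hy).2
    have hmiss : x.2 ∉ ks → P.filter (fun y => y.2 == x.2) = [] := by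
      intro hn
      rw [List.filter_eq_nil_iff]
      intro y hy
      simp only [beq_iff_eq]
      intro he
      exact hn ((hksmem x.2).mpr (he ▸ List.mem_map_of_mem hy))
    rw [hsort, ih, insertBy_flatMap x ks _ hksdec hfilt hmiss]
    -- identify the new key list and the new buckets
    have hkeys : PySem.List.sorted (PySem.Set.ofList ((P ++ [x]).map (fun y => y.2))) (fun k => k) true
        = insDesc x.2 ks := by
      have hset : PySem.Set.ofList ((P ++ [x]).map (fun y => y.2))
          = PySem.Set.add (PySem.Set.ofList (P.map (fun y => y.2))) x.2 := by
        rw [List.map_append, List.map_cons, List.map_nil, PySem.Set.ofList_eq_foldl,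
          List.foldl_append, List.foldl_cons, List.foldl_nil, ← PySem.Set.ofList_eq_foldl]
      rw [hset]
      by_cases hmem : x.2 ∈ ks
      · have hc : PySem.Set.contains (PySem.Set.ofList (P.map (fun y => y.2))) x.2 = true := by
          unfold PySem.Set.contains
          rw [List.contains_eq_mem, decide_eq_true_eq, PySem.Set.mem_ofList]
          exact (hksmem x.2).mp hmem
        have : PySem.Set.add (PySem.Set.ofList (P.map (fun y => y.2))) x.2
            = PySem.Set.ofList (P.map (fun y => y.2)) := by
          unfold PySem.Set.add
          exact if_pos hc
        rw [this, ← hks, insDesc_of_mem x.2 ks hksdec hmem]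
      · have hc : PySem.Set.contains (PySem.Set.ofList (P.map (fun y => y.2))) x.2 = false := by
          unfold PySem.Set.contains
          rw [List.contains_eq_mem]
          simp only [decide_eq_false_iff_not, PySem.Set.mem_ofList]
          exact fun h => hmem ((hksmem x.2).mpr h)
        have hadd : PySem.Set.add (PySem.Set.ofList (P.map (fun y => y.2))) x.2
            = PySem.Set.ofList (P.map (fun y => y.2)) ++ [x.2] := by
          unfold PySem.Set.add
          exact if_neg (fun h => Bool.false_ne_true (hc ▸ h))
        rw [hadd]
        refine PySem.List.sorted_rev_eq_of_perm_of_pairwise_gt _ _ _ ?_ (pairwise_insDesc _ _ hksdec)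
        refine (insDesc_perm x.2 ks hmem).trans ?_
        refine List.Perm.trans ?_ (List.perm_append_comm (l₁ := [x.2]))
        exact List.Perm.cons x.2 (PySem.List.sorted_perm _ _ _)
    rw [hkeys]
    refine List.flatMap_congr ?_
    intro k hk
    rw [List.filter_append, List.filter_cons, List.filter_nil]
    by_cases he : k = x.2
    · subst he
      simp
    · rw [if_neg he, if_neg (by simp only [beq_iff_eq]; omega)]
      simp

-- ---------- B's grouping dict ----------

theorem getD_group (P : List (String × Int)) :
    ∀ (d : PySem.Dict Int (List String)) (k : Int),
    (P.foldl (fun d x => d.modify x.2 [] (fun l => l ++ [x.1])) d).getD k []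
      = d.getD k [] ++ (P.filter (fun x => x.2 == k)).map (fun x => x.1) := by
  induction P with
  | nil => intro d k; simp
  | cons x P ih =>
    intro d k
    rw [List.foldl_cons, ih, List.filter_cons]
    by_cases he : x.2 = k
    · subst he
      rw [if_pos (by simp), PySem.Dict.getD_modify_self]
      simp
    · rw [if_neg (by simp [he]), PySem.Dict.getD_modify_of_ne d [] _ (Ne.symm he)]

-- ---------- B's capped emission loops ----------

theorem selBucketInner_eq (top_n : Int) :
    ∀ (L res : List String),
    selBucketInner top_n L res
      = (res ++ L.take (top_n - res.length).toNat,
         !L.isEmpty && decide (top_n < (res.length : Int) + L.length)) := by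
  intro L
  induction L with
  | nil => intro res; simp [selBucketInner]
  | cons s rest ih =>
    intro res
    simp only [selBucketInner]
    split_ifs with hfull
    · have h0 : (top_n - (res.length : Int)).toNat = 0 := by omega
      rw [Prod.mk.injEq]
      constructor
      · simp [h0]
      · simp only [List.isEmpty_cons, Bool.not_false, Bool.true_and, List.length_cons]
        rw [eq_comm, decide_eq_true_eq]
        push_cast
        omega
    · rw [ih (res ++ [s]), Prod.mk.injEq]
      have h1 : (top_n - (res.length : Int)).toNat = (top_n - ((res ++ [s]).length : Int)).toNat + 1 := by
        simp only [List.length_append, List.length_cons, List.length_nil]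
        omega
      constructor
      · rw [h1, List.take_succ_cons, List.append_assoc]
        rfl
      · cases rest with
        | nil =>
          simp only [List.isEmpty_nil, Bool.not_true, Bool.false_and, List.isEmpty_cons,
            Bool.not_false, Bool.true_and]
          rw [eq_comm, decide_eq_false_iff_not]
          simp only [List.length_cons, List.length_nil]
          push_cast
          omega
        | cons t ts =>
          simp only [List.isEmpty_cons, Bool.not_false, Bool.true_and]
          rw [decide_eq_decide]
          simp only [List.length_append, List.length_cons, List.length_nil]
          push_cast
          omega

theorem selBucketOuter_eq (buckets : PySem.Dict Int (List String)) (top_n : Int) :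
    ∀ (ks : List Int) (res : List String),
    selBucketOuter buckets top_n ks res
      = res ++ (ks.flatMap (fun k => buckets.getD k [])).take (top_n - res.length).toNat := by
  intro ks
  induction ks with
  | nil => intro res; simp [selBucketOuter]
  | cons k ks ih =>
    intro res
    simp only [selBucketOuter, selBucketInner_eq, List.flatMap_cons]
    set L := buckets.getD k [] with hL
    cases hflag : (!L.isEmpty && decide (top_n < (res.length : Int) + L.length)) with
    | true =>
      -- cap reached within this bucket: the tail buckets contribute nothing
      simp only [Bool.and_eq_true, decide_eq_true_eq] at hflag
      have hcap : (top_n - res.length).toNat ≤ L.length := by omega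
      rw [List.take_append_of_le_length hcap]
    | false =>
      show selBucketOuter buckets top_n ks (res ++ List.take (top_n - (res.length : Int)).toNat L) = _
      rw [ih]
      simp only [Bool.and_eq_false_iff, Bool.not_eq_false', decide_eq_false_iff_not, not_lt] at hflag
      rcases hflag with hemp | hroom
      · have : L = [] := List.isEmpty_iff.mp hemp
        simp [this]
      · have hle : L.length ≤ (top_n - res.length).toNat := by omega
        have h3 : L.take (top_n - res.length).toNat = L := List.take_of_length_le hle
        rw [List.take_append, h3, ← List.append_assoc]
        congr 2
        simp only [List.length_append]
        omega

-- ===== VERDICT (by name: the statement is the Claim_ definition above) =====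
theorem select_augmentations_spec : Claim_equal_select_augmentations := by
  intro score_dkl T_domain_raw T_base_raw max_len fmin top_n _
  unfold Spec_select_augmentations
  have hA : select_augmentations score_dkl T_domain_raw T_base_raw max_len fmin top_n
      = ((PySem.List.sorted
            ((PySem.Dict.ofList score_dkl).items.filter
              (fun x => decide (PySem.Str.len x.1 ≤ max_len) &&
                decide ((PySem.Dict.ofList T_domain_raw).getD x.1 0 ≥ fmin) &&
                decide ((PySem.Dict.ofList T_base_raw).getD x.1 0 ≥ fmin)))
            (fun x => -x.2) false).map (fun x => x.1)).take top_n.toNat := by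
    unfold select_augmentations
    rw [selAugLoop_eq, filter_sorted]
    simp
  have hfc : ((PySem.Dict.ofList score_dkl).items.filter
        (fun x => decide (PySem.Str.len x.1 ≤ max_len ∧
          (PySem.Dict.ofList T_domain_raw).getD x.1 0 ≥ fmin ∧
          (PySem.Dict.ofList T_base_raw).getD x.1 0 ≥ fmin)))
      = ((PySem.Dict.ofList score_dkl).items.filter
        (fun x => decide (PySem.Str.len x.1 ≤ max_len) &&
          decide ((PySem.Dict.ofList T_domain_raw).getD x.1 0 ≥ fmin) &&
          decide ((PySem.Dict.ofList T_base_raw).getD x.1 0 ≥ fmin))) :=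
    List.filter_congr (fun x _ => by
      rw [Bool.decide_and, Bool.decide_and, Bool.and_assoc])
  simp only [select_augmentations_alt]
  rw [PySem.List.foldl_ite_eq_foldl_filter
        (p := fun x : String × Int => PySem.Str.len x.1 ≤ max_len ∧
          (PySem.Dict.ofList T_domain_raw).getD x.1 0 ≥ fmin ∧
          (PySem.Dict.ofList T_base_raw).getD x.1 0 ≥ fmin)
        (f := fun (d : PySem.Dict Int (List String)) (x : String × Int) =>
          d.modify x.2 [] (fun l => l ++ [x.1])),
      hfc, selBucketOuter_eq]
  rw [PySem.Dict.keys_foldl_modify_key _ (fun x : String × Int => x.2) []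
        (fun _ x l => l ++ [x.1]), PySem.Dict.keys_empty]
  rw [show ∀ l : List Int, PySem.Set.update ([] : PySem.Set Int) l = PySem.Set.ofList l
        from fun l => rfl]
  rw [List.flatMap_congr (fun k _ => by rw [getD_group])]
  rw [hA, sorted_eq_buckets, List.map_flatMap]
  simp
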